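-- pv_equiv track=rewrite | github.com/Vinicius-CRodrigues/APC | strings/strPT3.py | cebolinhar
-- ===== SOURCE A (Python) =====
-- def cebolinhar(frase):
--     ultima_letra_r = False
--     nova_frase = ''
--
--     for letra in frase:
--         if letra == 'r':
--             if not ultima_letra_r:
--                 nova_frase += 'l'
--                 ultima_letra_r = True
--             letra = 'l'
--         elif letra == 'R':
--             if not ultima_letra_r:
--                 nova_frase += 'L'
--                 ultima_letra_r = True
--             letra = 'L'
--         else:
--             nova_frase += letra
--             ultima_letra_r = False
--
--
--     return nova_frase
-- ===== SOURCE B (Python) =====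
-- def cebolinhar(frase):
--     pieces = []
--     i = 0
--     n = len(frase)
--     while i < n:
--         c = frase[i]
--         if c in 'rR':
--             pieces.append('l' if c == 'r' else 'L')
--             while i < n and frase[i] in 'rR':
--                 i += 1
--         else:
--             pieces.append(c)
--             i += 1
--     return ''.join(pieces)
-- ===== Notes on version B (the rewrite author's own statement) =====
-- stated objective: alternative
-- what changed: Replaces the per-character boolean-flag state machine with a run scanner: an index loop that, on hitting an r/R run, emits one letter keyed by the run's first character and skips the whole run, collecting pieces in a list joined once.
import Mathlib
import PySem

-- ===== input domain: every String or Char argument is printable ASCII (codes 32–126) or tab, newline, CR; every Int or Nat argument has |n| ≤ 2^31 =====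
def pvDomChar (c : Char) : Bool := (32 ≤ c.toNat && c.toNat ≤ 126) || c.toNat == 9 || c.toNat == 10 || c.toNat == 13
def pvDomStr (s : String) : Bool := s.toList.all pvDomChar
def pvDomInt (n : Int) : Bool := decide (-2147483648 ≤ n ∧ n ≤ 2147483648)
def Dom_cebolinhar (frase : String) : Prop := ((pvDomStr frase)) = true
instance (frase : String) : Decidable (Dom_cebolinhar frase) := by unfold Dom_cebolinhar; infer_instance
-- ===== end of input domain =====

-- B replaces A's per-character boolean-flag state machine with a run scanner that
-- emits one letter per r/R run (keyed by the run's first character) and skips the run.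

-- ===== PORT A =====
-- A's loop: state = (ultima_letra_r flag, accumulated output).
def cebolinharLoop : List Char → Bool → List Char → List Char
  | [], _, acc => acc
  | c :: rest, flag, acc =>
    if c = 'r' then
      if flag then cebolinharLoop rest true acc
      else cebolinharLoop rest true (acc ++ ['l'])
    else if c = 'R' then
      if flag then cebolinharLoop rest true acc
      else cebolinharLoop rest true (acc ++ ['L'])
    else cebolinharLoop rest false (acc ++ [c])

def cebolinhar (frase : String) : String :=
  String.ofList (cebolinharLoop frase.toList false [])

-- ===== PORT B =====
-- Source B's inner `while i < n and frase[i] in 'rR': i += 1` run skip.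
def cebSkipRun : List Char → List Char
  | [] => []
  | c :: rest => if c = 'r' ∨ c = 'R' then cebSkipRun rest else c :: rest

theorem cebSkipRun_length_le (l : List Char) : (cebSkipRun l).length ≤ l.length := by
  induction l with
  | nil => simp [cebSkipRun]
  | cons c rest ih =>
    simp only [cebSkipRun]
    split
    · exact Nat.le_succ_of_le ih
    · simp

-- Source B's outer index loop, as recursion on the remaining characters.
def cebAltLoop : List Char → List Char
  | [] => []
  | c :: rest =>
    if c = 'r' ∨ c = 'R' then
      (if c = 'r' then 'l' else 'L') :: cebAltLoop (cebSkipRun rest)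
    else
      c :: cebAltLoop rest
termination_by l => l.length
decreasing_by
  · exact Nat.lt_succ_of_le (cebSkipRun_length_le rest)
  · simp

def cebolinhar_alt (frase : String) : String :=
  String.ofList (cebAltLoop frase.toList)

-- ===== PRECONDITION & SPEC =====
def Spec_cebolinhar (frase : String) (out : String) : Prop := out = cebolinhar_alt frase
instance (frase : String) (out : String) : Decidable (Spec_cebolinhar frase out) := by unfold Spec_cebolinhar; infer_instance

-- ===== CLAIM (what is proved, stated in full; the proofs are below) =====
def Claim_equal_cebolinhar : Prop := ∀ (frase : String), Dom_cebolinhar frase → Spec_cebolinhar frase (cebolinhar frase)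

-- ===== LEMMAS AND PROOFS =====

-- A's loop with flag=true drops the pending run then behaves like B; with flag=false it is B.
theorem cebLoop_eq (l : List Char) : ∀ acc : List Char,
    cebolinharLoop l true acc = acc ++ cebAltLoop (cebSkipRun l) ∧
    cebolinharLoop l false acc = acc ++ cebAltLoop l := by
  induction l with
  | nil => intro acc; simp [cebolinharLoop, cebAltLoop, cebSkipRun]
  | cons c rest ih =>
    intro acc
    by_cases hr : c = 'r'
    · subst hr
      constructor
      · simp only [cebolinharLoop, cebSkipRun]
        exact (ih acc).1
      · simp only [cebolinharLoop, cebAltLoop, if_pos (Or.inl rfl)]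
        rw [(ih (acc ++ ['l'])).1]
        simp
    · by_cases hR : c = 'R'
      · subst hR
        constructor
        · simp only [cebolinharLoop, cebSkipRun, if_neg hr]
          exact (ih acc).1
        · simp only [cebolinharLoop, cebAltLoop, if_neg hr, if_pos (Or.inr rfl)]
          rw [(ih (acc ++ ['L'])).1]
          simp
      · have hno : ¬ (c = 'r' ∨ c = 'R') := by tauto
        constructor
        · simp only [cebolinharLoop, cebSkipRun, cebAltLoop, if_neg hr, if_neg hR, if_neg hno]
          rw [(ih (acc ++ [c])).2]
          simp
        · simp only [cebolinharLoop, cebAltLoop, if_neg hr, if_neg hR, if_neg hno]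
          rw [(ih (acc ++ [c])).2]
          simp

-- ===== VERDICT (by name: the statement is the Claim_ definition above) =====
theorem cebolinhar_spec : Claim_equal_cebolinhar := by
  intro frase _
  unfold Spec_cebolinhar cebolinhar cebolinhar_alt
  rw [(cebLoop_eq frase.toList []).2]
  simp
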